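-- pv_equiv track=rewrite | github.com/SDET-SOLOMAN/code_wars_python | kata_6s/dupe_encoder.py | duplicate_encode2
-- ===== SOURCE A (Python) =====
-- def duplicate_encode2(word):
--     word = word.lower()
--     new_word = ""
--     char_count = {}
--     for char in word:
--         if char not in char_count:
--             char_count[char] = 1
--         else:
--             char_count[char] += 1
--     for char in word:
--         if char_count[char] > 1:
--             new_word += ")"
--         else:
--             new_word += "("
--     return new_word
-- ===== SOURCE B (Python) =====
-- def duplicate_encode2(word):
--     word = word.lower()
--     return "".join(")" if c in word[:i] or c in word[i+1:] else "(" for i, c in enumerate(word))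
-- ===== Notes on version B (the rewrite author's own statement) =====
-- stated objective: alternative
-- what changed: Replaces the frequency-dict counting pass entirely: B never counts anything, it decides each position by a positional test (does the character also occur in the slice before it or the slice after it) inside one join over enumerate.
import Mathlib
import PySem

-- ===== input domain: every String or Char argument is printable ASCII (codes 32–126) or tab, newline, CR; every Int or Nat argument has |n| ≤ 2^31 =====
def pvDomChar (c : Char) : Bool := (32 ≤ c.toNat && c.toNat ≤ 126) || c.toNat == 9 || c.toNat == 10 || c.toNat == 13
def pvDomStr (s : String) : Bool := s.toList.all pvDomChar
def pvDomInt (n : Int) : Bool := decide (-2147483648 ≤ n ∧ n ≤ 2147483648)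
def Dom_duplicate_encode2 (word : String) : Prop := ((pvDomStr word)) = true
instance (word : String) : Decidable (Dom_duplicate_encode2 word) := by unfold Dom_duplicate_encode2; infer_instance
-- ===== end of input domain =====

-- B drops the frequency dict entirely: each character is judged duplicate by a
-- positional test (occurs in the slice before it or after it) in one join over enumerate.


-- ===== PORT A =====
def duplicate_encode2 (word : String) : String :=
  let w := (PySem.Str.lower word).toList
  let char_count : PySem.Dict Char Int :=
    w.foldl (fun d c => if d.contains c = false then d.insert c 1 else d.modify c 0 (· + 1))
      PySem.Dict.empty
  let new_word : List Char :=
    w.foldl (fun acc c => if char_count.getD c 0 > 1 then acc ++ [')'] else acc ++ ['(']) []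
  String.ofList new_word

-- ===== PORT B =====
-- for i, c in enumerate(word): ")" if c in word[:i] or c in word[i+1:] else "("
def duplicate_encode2_alt (word : String) : String :=
  let w := (PySem.Str.lower word).toList
  String.ofList ((PySem.List.enumerate w 0).map (fun ic =>
    if PySem.Chars.isIn [ic.2] (PySem.List.slice w none (some ic.1)) ||
       PySem.Chars.isIn [ic.2] (PySem.List.slice w (some (ic.1 + 1)) none)
    then ')' else '('))

-- ===== PRECONDITION & SPEC =====
def Spec_duplicate_encode2 (word : String) (out : String) : Prop := out = duplicate_encode2_alt word
instance (word : String) (out : String) : Decidable (Spec_duplicate_encode2 word out) := by unfold Spec_duplicate_encode2; infer_instance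

-- ===== CLAIM =====
def Claim_equal_duplicate_encode2 : Prop := ∀ (word : String), Dom_duplicate_encode2 word → Spec_duplicate_encode2 word (duplicate_encode2 word)

-- ===== LEMMAS AND PROOFS =====

-- A's counting loop builds exactly the character counts: getD is the list count.
theorem getD_countLoop (l : List Char) (d : PySem.Dict Char Int) (v : Char) :
    (l.foldl (fun d c => if d.contains c = false then d.insert c 1 else d.modify c 0 (· + 1)) d).getD v 0
      = d.getD v 0 + l.count v := by
  induction l generalizing d with
  | nil => simp
  | cons c t ih =>
    simp only [List.foldl_cons, ih, List.count_cons]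
    by_cases hc : d.contains c = false
    · simp only [hc, if_true]
      rw [PySem.Dict.getD_insert]
      by_cases hv : v = c
      · subst hv
        rw [PySem.Dict.getD_of_not_contains d 0 hc]
        simp
        omega
      · simp [hv, Ne.symm hv]
    · have hc' : d.contains c = true := by simpa using hc
      simp only [hc', Bool.true_eq_false, if_false]
      rw [PySem.Dict.getD_modify]
      by_cases hv : v = c
      · subst hv; simp; ring
      · simp [hv, Ne.symm hv]

theorem emit_loop_eq (l : List Char) (cnt : Char → Int) (acc : List Char) :
    (l.foldl (fun acc c => if cnt c > 1 then acc ++ [')'] else acc ++ ['(']) acc)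
      = acc ++ l.map (fun c => if cnt c > 1 then ')' else '(') := by
  induction l generalizing acc with
  | nil => simp
  | cons c t ih =>
    simp only [List.foldl_cons, List.map_cons]
    by_cases h : cnt c > 1
    · simp [h, ih]
    · simp [h, ih]

theorem singleton_infix_iff_mem (a : Char) (l : List Char) : [a] <:+: l ↔ a ∈ l := by
  constructor
  · intro h; exact h.subset (List.mem_singleton_self a)
  · intro h
    obtain ⟨s, t, hst⟩ := List.append_of_mem h
    exact ⟨s, t, by simp [hst]⟩

-- positional duplicate test ↔ count > 1, at a valid index holding that character
theorem positional_iff_count (w : List Char) (i : Nat) (hi : i < w.length) :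
    (w[i] ∈ w.take i ∨ w[i] ∈ w.drop (i + 1)) ↔ 1 < w.count w[i] := by
  obtain ⟨c, hc⟩ : ∃ c, w[i] = c := ⟨_, rfl⟩
  rw [hc]
  have hsplit : w.count c = (w.take i).count c + (1 + (w.drop (i + 1)).count c) := by
    conv_lhs => rw [← List.take_append_drop i w]
    rw [List.count_append, List.drop_eq_getElem_cons hi, hc, List.count_cons_self]
    omega
  simp only [← List.count_pos_iff]
  omega

-- ===== VERDICT =====
theorem duplicate_encode2_spec : Claim_equal_duplicate_encode2 := by
  intro word _
  show duplicate_encode2 word = duplicate_encode2_alt word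
  simp only [duplicate_encode2, duplicate_encode2_alt]
  rw [emit_loop_eq, List.nil_append]
  refine congrArg String.ofList ?_
  set w := (PySem.Str.lower word).toList with hw
  rw [PySem.List.enumerate_eq_zipIdx_map, List.map_map]
  apply List.ext_getElem
  · simp
  · intro i h1 h2
    have hi : i < w.length := by simpa using h1
    simp only [List.getElem_map, List.getElem_zipIdx, Function.comp_apply]
    simp only [zero_add]
    rw [PySem.List.slice_to w (by positivity), PySem.List.slice_from w (by positivity)]
    have ht : ((i : Int)).toNat = i := by omega
    have ht1 : ((i : Int) + 1).toNat = i + 1 := by omega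
    rw [ht, ht1]
    rw [getD_countLoop]
    by_cases hdup : w[i] ∈ w.take i ∨ w[i] ∈ w.drop (i + 1)
    · have hcnt : 1 < w.count w[i] := (positional_iff_count w i hi).mp hdup
      rcases hdup with hmem | hmem <;>
        · simp [PySem.Chars.isIn_iff_infix, singleton_infix_iff_mem, hmem]
          exact hcnt
    · rw [not_or] at hdup
      have hcnt : ¬ 1 < w.count w[i] := fun hc =>
        (not_or.mpr ⟨hdup.1, hdup.2⟩) ((positional_iff_count w i hi).mpr hc)
      simp [PySem.Chars.isIn_iff_infix, singleton_infix_iff_mem, hdup.1, hdup.2]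
      omega
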